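-- pv_equiv track=rewrite | github.com/ZongjingLi/MetaLearner | helchriss/knowledge/legacy_executor.py | find_first_token
-- ===== SOURCE A (Python) =====
-- def find_first_token(str, tok):
--     start_index = 0
--     while True:
--         # Find the index of the next occurrence of the token
--         next_index = str.find(tok, start_index)
--
--         # If the token is not found, return -1
--         if next_index == -1:
--             return -1
--
--         # Check if the token is followed by a "-"
--         if next_index + len(tok) < len(str) and str[next_index + len(tok)] == "-":
--             # If the token is followed by a "-", update the start index and continue searching
--             start_index = next_index + 1
--             continue
--
--         # Otherwise, return the starting index of the token
--         return next_index
-- ===== SOURCE B (Python) =====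
-- def find_first_token(str, tok):
--     n = len(str)
--     m = len(tok)
--     for i in range(n + 1):
--         if str.startswith(tok, i) and not str.startswith("-", i + m):
--             return i
--     return -1
-- ===== Notes on version B (the rewrite author's own statement) =====
-- stated objective: simpler
-- what changed: Replaces the find-and-jump while-loop (repeated str.find with restart after a dash-followed hit) by a single left-to-right scan over every index using startswith, returning the first index where the token occurs and is not followed by '-'.
import Mathlib
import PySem

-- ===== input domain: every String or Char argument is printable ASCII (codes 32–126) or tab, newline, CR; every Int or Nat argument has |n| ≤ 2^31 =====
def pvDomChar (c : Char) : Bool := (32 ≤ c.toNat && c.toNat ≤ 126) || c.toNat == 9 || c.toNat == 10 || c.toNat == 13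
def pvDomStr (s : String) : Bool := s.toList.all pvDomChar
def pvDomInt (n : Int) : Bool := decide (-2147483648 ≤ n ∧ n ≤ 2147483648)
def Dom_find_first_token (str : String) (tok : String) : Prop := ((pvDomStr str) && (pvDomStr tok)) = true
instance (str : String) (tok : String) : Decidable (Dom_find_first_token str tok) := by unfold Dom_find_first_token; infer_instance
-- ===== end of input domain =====

-- B replaces A's find-and-jump while-loop by a single left-to-right index scan with
-- startswith (simpler decomposition, same asymptotic cost); A = B is proved on all inputs.


-- ===== PORT A =====
-- A's `while True` loop: `str.find(tok, start)`, restart at next_index+1 when the hit is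
-- followed by '-'. start_index strictly increases and stays ≤ len, so fuel len+2 is enough.
def pvALoop (s tok : List Char) : Nat → Nat → Int
  | 0, _ => -1  -- never reached with the fuel find_first_token supplies (proved below)
  | fuel + 1, start =>
    let next := PySem.Chars.findFrom s tok (start : Int) none
    if next = -1 then -1
    else if next + (tok.length : Int) < (s.length : Int) ∧
            PySem.List.pyGetD s (next + (tok.length : Int)) ' ' = '-' then
      pvALoop s tok fuel (next.toNat + 1)
    else next

def find_first_token (str : String) (tok : String) : Int :=
  pvALoop str.toList tok.toList (str.toList.length + 2) 0

-- ===== PORT B =====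
-- B: for i in range(len(str)+1): if str.startswith(tok, i) and not str.startswith("-", i+len(tok)): return i; return -1
def pvBScan (s tok : List Char) : Nat → Nat → Int
  | 0, _ => -1
  | fuel + 1, i =>
    if PySem.Chars.startswith (s.drop i) tok
        && !PySem.Chars.startswith (s.drop (i + tok.length)) ['-'] then (i : Int)
    else pvBScan s tok fuel (i + 1)

def find_first_token_alt (str : String) (tok : String) : Int :=
  pvBScan str.toList tok.toList (str.toList.length + 1) 0

-- ===== PRECONDITION & SPEC =====
def Spec_find_first_token (str : String) (tok : String) (out : Int) : Prop := out = find_first_token_alt str tok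
instance (str : String) (tok : String) (out : Int) : Decidable (Spec_find_first_token str tok out) := by unfold Spec_find_first_token; infer_instance

-- ===== CLAIM (what is proved, stated in full; the proofs are below) =====
def Claim_equal_find_first_token : Prop := ∀ (str : String) (tok : String), Dom_find_first_token str tok → Spec_find_first_token str tok (find_first_token str tok)

-- ===== LEMMAS AND PROOFS =====

-- the condition B tests at index i, as a Prop
def pvTest (s tok : List Char) (i : Nat) : Prop :=
  tok <+: s.drop i ∧ ¬ ['-'] <+: s.drop (i + tok.length)

lemma pvBScan_step_pos (s tok : List Char) (fuel i : Nat) (h : pvTest s tok i) :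
    pvBScan s tok (fuel + 1) i = (i : Int) := by
  have hb : (PySem.Chars.startswith (s.drop i) tok
      && !PySem.Chars.startswith (s.drop (i + tok.length)) ['-']) = true := by
    simp only [Bool.and_eq_true, Bool.not_eq_true', Bool.eq_false_iff]
    exact ⟨(PySem.Chars.startswith_iff _ _).mpr h.1,
      fun hb => h.2 ((PySem.Chars.startswith_iff _ _).mp hb)⟩
  simp only [pvBScan, hb, if_true]

lemma pvBScan_step_neg (s tok : List Char) (fuel i : Nat) (h : ¬ pvTest s tok i) :
    pvBScan s tok (fuel + 1) i = pvBScan s tok fuel (i + 1) := by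
  simp only [pvBScan]
  rw [if_neg]
  intro hb
  simp only [Bool.and_eq_true, Bool.not_eq_true'] at hb
  exact h ⟨(PySem.Chars.startswith_iff _ _).mp hb.1,
    fun hc => by simp [(PySem.Chars.startswith_iff _ _).mpr hc] at hb⟩

lemma singleton_prefix_iff (c : Char) (l : List Char) : [c] <+: l ↔ l.head? = some c := by
  cases l with
  | nil => simp
  | cons a t => simp [List.cons_prefix_iff]

-- B returns -1 when the token never occurs from i on
lemma pvBScan_none (s tok : List Char) (fuel : Nat) :
    ∀ i, (∀ j, i ≤ j → ¬ tok <+: s.drop j) → pvBScan s tok fuel i = -1 := by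
  induction fuel with
  | zero => intro i _; simp [pvBScan]
  | succ fuel ih =>
    intro i h
    rw [pvBScan_step_neg s tok fuel i (fun ht => h i le_rfl ht.1)]
    exact ih (i + 1) (fun j hj => h j (by omega))

-- B skips a stretch on which the test fails
lemma pvBScan_skip (s tok : List Char) :
    ∀ d i fuel, (∀ j, i ≤ j → j < i + d → ¬ pvTest s tok j) →
      pvBScan s tok (fuel + d) i = pvBScan s tok fuel (i + d) := by
  intro d
  induction d with
  | zero => intro i fuel _; rfl
  | succ d ih =>
    intro i fuel h
    have he : fuel + (d + 1) = (fuel + d) + 1 := by omega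
    rw [he, pvBScan_step_neg s tok _ i (h i le_rfl (by omega))]
    rw [ih (i + 1) fuel (fun j hj1 hj2 => h j (by omega) (by omega))]
    congr 1
    omega

-- main loop equivalence: A's jump loop from `start` computes what B's scan computes
lemma pvLoop_eq (s tok : List Char) :
    ∀ fuelA start, start ≤ s.length → s.length + 1 - start ≤ fuelA →
      pvALoop s tok fuelA start = pvBScan s tok (s.length + 1 - start) start := by
  intro fuelA
  induction fuelA with
  | zero => intro start h1 h2; omega
  | succ fuelA ih =>
    intro start h1 h2
    simp only [pvALoop]
    set next := PySem.Chars.findFrom s tok (start : Int) none with hnext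
    by_cases hn : next = -1
    · -- token absent from start on: B also returns -1
      rw [if_pos hn]
      have habs : ¬ tok <:+: s.drop start :=
        (PySem.Chars.findFrom_natCast_eq_neg_one_iff s tok start h1).mp hn
      refine (pvBScan_none s tok _ start ?_).symm
      intro j hj hp
      apply habs
      have hdd : s.drop j = (s.drop start).drop (j - start) := by
        rw [List.drop_drop]; congr 1; omega
      rw [hdd] at hp
      exact hp.isInfix.trans (List.drop_suffix _ _).isInfix
    · rw [if_neg hn]
      obtain ⟨hge, hpre, hmin⟩ := PySem.Chars.findFrom_natCast_spec s tok start h1 hn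
      set j := next.toNat with hj
      have hnext_eq : next = (j : Int) := by omega
      have hjs : start ≤ j := by omega
      have hidx : ((j : Int) + (tok.length : Int)).toNat = j + tok.length := by omega
      -- j ≤ s.length: otherwise s.drop j = [] forces tok = [], contradicting minimality at s.length
      have hjle : j ≤ s.length := by
        by_contra hgt
        have hnil : s.drop j = [] := List.drop_eq_nil_of_le (by omega)
        have htok : tok = [] := List.prefix_nil.mp (hnil ▸ hpre)
        exact hmin s.length h1 (by omega) (by simp [htok])
      have hfail : ∀ i, start ≤ i → i < j → ¬ pvTest s tok i :=
        fun i hi1 hi2 ht => hmin i hi1 hi2 ht.1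
      by_cases hd : next + (tok.length : Int) < (s.length : Int) ∧
          PySem.List.pyGetD s (next + (tok.length : Int)) ' ' = '-'
      · -- dash after the hit: A restarts at j+1; B skips past j too
        rw [if_pos hd]
        have hlt : j + tok.length < s.length := by omega
        have hchar : s[j + tok.length]? = some '-' := by
          have hgd := hd.2
          rw [hnext_eq, PySem.List.pyGetD_eq_getElem s ' ' (by omega) (by omega)] at hgd
          have : s[((j : Int) + (tok.length : Int)).toNat]? = some '-' := by
            rw [List.getElem?_eq_getElem (by omega)]
            exact congrArg some hgd
          rwa [hidx] at this
        have hdash : ¬ pvTest s tok j := by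
          intro ht
          exact ht.2 ((singleton_prefix_iff '-' _).mpr (by rw [List.head?_drop]; exact hchar))
        have hskip : ∀ i, start ≤ i → i < start + (j + 1 - start) → ¬ pvTest s tok i := by
          intro i hi1 hi2
          rcases Nat.lt_or_ge i j with h | h
          · exact hfail i hi1 h
          · have he : i = j := by omega
            exact he ▸ hdash
        have harith : s.length + 1 - start = (s.length + 1 - (j + 1)) + (j + 1 - start) := by omega
        rw [harith, pvBScan_skip s tok (j + 1 - start) start _ hskip]
        have he : start + (j + 1 - start) = j + 1 := by omega
        rw [he]
        exact ih (j + 1) (by omega) (by omega)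
      · -- no dash: A returns next = j; B's scan reaches j and the test holds there
        rw [if_neg hd]
        have hok : pvTest s tok j := by
          refine ⟨hpre, ?_⟩
          intro hp
          rw [singleton_prefix_iff, List.head?_drop] at hp
          have hlt : j + tok.length < s.length := by
            by_contra hge'
            rw [List.getElem?_eq_none (by omega)] at hp
            simp at hp
          apply hd
          refine ⟨by omega, ?_⟩
          rw [hnext_eq, PySem.List.pyGetD_eq_getElem s ' ' (by omega) (by omega)]
          have hp' : s[((j : Int) + (tok.length : Int)).toNat]? = some '-' := by rw [hidx]; exact hp
          rw [List.getElem?_eq_getElem (by omega)] at hp'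
          exact Option.some.inj hp'
        have hskip : ∀ i, start ≤ i → i < start + (j - start) → ¬ pvTest s tok i :=
          fun i hi1 hi2 => hfail i hi1 (by omega)
        have harith : s.length + 1 - start = ((s.length - j) + 1) + (j - start) := by omega
        rw [harith, pvBScan_skip s tok (j - start) start _ hskip]
        have he : start + (j - start) = j := by omega
        rw [he, pvBScan_step_pos s tok _ j hok, hnext_eq]

-- ===== VERDICT (by name: the statement is the Claim_ definition above) =====
theorem find_first_token_spec : Claim_equal_find_first_token := by
  intro str tok _
  unfold Spec_find_first_token find_first_token find_first_token_alt
  have h := pvLoop_eq str.toList tok.toList (str.toList.length + 2) 0 (by omega) (by omega)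
  simpa using h
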